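-- pv_equiv track=rewrite | github.com/turris-cz/os-build | helpers/check-packages.py | indexread
-- ===== SOURCE A (Python) =====
-- def indexread(index):
--     """Reader of index file that provides access to parsed index.
--     """
--     pkg = {}
--     last = None
--     end = 0
--     for line in index:
--         line = line.rstrip()
--         if line == "":
--             end += 1
--         elif line[0] == ' ' and last:
--             if end:  # We eat empty lines so we should append them back
--                 pkg[last] += '\n' * end
--             pkg[last] += '\n' + line[1:]
--             end = 0
--         elif ':' in line:
--             if end:
--                 yield pkg
--                 pkg = {}
--             attr, value = line.split(':', maxsplit=1)
--             pkg[attr] = value.strip()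
--             last = attr
--             end = 0
--         else:
--             raise ValueError(f"Invalid index line: {line}")
--     yield pkg
-- ===== SOURCE B (Python) =====
-- def indexread(index):
--     """Reader of index file that provides access to parsed index.
--
--     Two-pass variant: pass 1 folds the raw lines into a flat list of
--     logical entries ([attr, value] with continuations and interior blank
--     runs already merged into the value) interleaved with None markers for
--     package-separating blank runs; pass 2 assembles and yields the dicts.
--     """
--     tokens = []   # None = blank-run separator, [attr, value] = logical entry
--     pending = 0   # blank lines seen since the last non-blank line
--     for raw in index:
--         line = raw.rstrip()
--         if line == "":
--             pending += 1
--         elif line[0] == ' ' and tokens and tokens[-1][0]: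
--             tokens[-1][1] += '\n' * pending + '\n' + line[1:]
--             pending = 0
--         elif ':' in line:
--             if pending:
--                 tokens.append(None)
--                 pending = 0
--             attr, value = line.split(':', maxsplit=1)
--             tokens.append([attr, value.strip()])
--         else:
--             raise ValueError(f"Invalid index line: {line}")
--     pkg = {}
--     for tok in tokens:
--         if tok is None:
--             yield pkg
--             pkg = {}
--         else:
--             pkg[tok[0]] = tok[1]
--     yield pkg
-- ===== Notes on version B (the rewrite author's own statement) =====
-- stated objective: alternative
-- what changed: A's single stateful generator loop (dict built, blanks counted and yields emitted in one state machine) is split into two passes: pass 1 folds the raw lines into a flat token list of logical [attr, value] entries (continuations and interior blank runs already merged into values) interleaved with blank-run separator markers, and pass 2 assembles and yields the package dicts from the tokens.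
import Mathlib
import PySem

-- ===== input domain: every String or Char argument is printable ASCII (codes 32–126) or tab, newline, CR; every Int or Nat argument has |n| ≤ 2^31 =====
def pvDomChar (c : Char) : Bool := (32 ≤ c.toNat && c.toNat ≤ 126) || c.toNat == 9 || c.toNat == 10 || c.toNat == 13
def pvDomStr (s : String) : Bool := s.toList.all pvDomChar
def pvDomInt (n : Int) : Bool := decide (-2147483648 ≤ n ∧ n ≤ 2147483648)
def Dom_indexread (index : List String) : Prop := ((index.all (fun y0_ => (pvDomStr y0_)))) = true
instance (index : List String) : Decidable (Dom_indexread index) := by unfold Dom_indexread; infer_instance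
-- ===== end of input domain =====

-- B re-decomposes A's single stateful generator loop into two passes (fold lines into
-- logical entry/separator tokens, then assemble the dicts); same results, objective: alternative.
-- Both Pythons are generators; equivalence is about the yielded sequence (list(...)).

-- ===== PORT A =====

-- Python truthiness of `last` (None or a string)
def pvLastTruthy : Option String → Bool
  | some a => a != ""
  | none => false

-- the for-loop of A: state = (accumulated yields, pkg, last, end)
def indexreadGo : List String → List (List (String × String)) → PySem.Dict String String → Option String → Nat → List (List (String × String))
  | [], acc, pkg, _last, _e => acc ++ [pkg.items]          -- trailing unconditional `yield pkg`
  | raw :: rest, acc, pkg, last, e =>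
    let line := PySem.Str.rstrip raw
    if line = "" then
      indexreadGo rest acc pkg last (e + 1)
    else if line.toList.head? = some ' ' ∧ pvLastTruthy last = true then
      -- `pkg[last] += '\n' * end` (only if end ≠ 0) then `pkg[last] += '\n' + line[1:]`
      let a := last.getD ""
      let pkg1 := if e ≠ 0 then pkg.modify a "" (fun v => String.ofList (v.toList ++ List.replicate e '\n')) else pkg
      let pkg2 := pkg1.modify a "" (fun v => String.ofList (v.toList ++ '\n' :: line.toList.drop 1))
      indexreadGo rest acc pkg2 last 0
    else if PySem.Str.isIn ":" line then
      match PySem.Str.splitMax? line ":" 1 with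
      | some (attr :: value :: _) =>
        let st := if e ≠ 0 then (acc ++ [pkg.items], PySem.Dict.empty) else (acc, pkg)   -- `if end: yield pkg; pkg = {}`
        indexreadGo rest st.1 (st.2.insert attr (PySem.Str.strip value)) (some attr) 0
      | _ => indexreadGo rest acc pkg last e   -- unreachable: split(':', 1) with ':' in line yields two parts
    else
      indexreadGo rest acc pkg last e          -- Python raises ValueError here; excluded by Pre_

def indexread (index : List String) : List (List (String × String)) :=
  indexreadGo index [] PySem.Dict.empty none 0

-- ===== PORT B =====

-- logical entries of pass 1: `sep` = blank-run separator (Python None), `kv` = [attr, value]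
inductive Tok
  | sep : Tok
  | kv : String → String → Tok
deriving DecidableEq, Repr

-- Python truthiness of `tokens and tokens[-1][0]` (tokens kept REVERSED here:
-- `tokens.append` = cons, `tokens[-1]` = head, reversed once at the end)
def pvHeadAttrTruthy : List Tok → Bool
  | Tok.kv a _ :: _ => a != ""
  | _ => false

-- `tokens[-1][1] += '\n' * pending + '\n' + line[1:]` (tokens reversed: update the head kv entry)
def contUpdate (revToks : List Tok) (pending : Nat) (tail : List Char) : List Tok :=
  match revToks with
  | Tok.kv a v :: rt => Tok.kv a (String.ofList (v.toList ++ List.replicate pending '\n' ++ '\n' :: tail)) :: rt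
  | rt => rt   -- unreachable: only called when pvHeadAttrTruthy holds, so the head is a kv

-- pass 1 of Source B: lines → tokens (state = reversed tokens, pending blank count)
def pass1 : List String → List Tok → Nat → List Tok
  | [], revToks, _pending => revToks.reverse
  | raw :: rest, revToks, pending =>
    let line := PySem.Str.rstrip raw
    if line = "" then
      pass1 rest revToks (pending + 1)
    else if line.toList.head? = some ' ' ∧ pvHeadAttrTruthy revToks = true then
      pass1 rest (contUpdate revToks pending (line.toList.drop 1)) 0
    else if PySem.Str.isIn ":" line then
      match PySem.Str.splitMax? line ":" 1 with
      | some (attr :: value :: _) =>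
        let revToks' := if pending ≠ 0 then Tok.sep :: revToks else revToks
        pass1 rest (Tok.kv attr (PySem.Str.strip value) :: revToks') 0
      | _ => pass1 rest revToks pending   -- unreachable, as in port A
    else
      pass1 rest revToks pending          -- Python raises ValueError here; excluded by Pre_

-- pass 2 of Source B: one token = one step of the assembling for-loop
def pass2Step (st : List (List (String × String)) × PySem.Dict String String) (t : Tok) :
    List (List (String × String)) × PySem.Dict String String :=
  match t with
  | Tok.sep => (st.1 ++ [st.2.items], PySem.Dict.empty)    -- `yield pkg; pkg = {}`
  | Tok.kv a v => (st.1, st.2.insert a v)                  -- `pkg[attr] = value`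

def indexread_alt (index : List String) : List (List (String × String)) :=
  let st := (pass1 index [] 0).foldl pass2Step ([], PySem.Dict.empty)
  st.1 ++ [st.2.items]                                     -- trailing `yield pkg`

-- ===== PRECONDITION & SPEC =====

-- the non-blank lines of the index, rstripped, in order
def pvNb (index : List String) : List String :=
  (index.map PySem.Str.rstrip).filter (fun l => l != "")

-- Pre_ excludes exactly the inputs on which A raises ValueError: after rstripping and dropping
-- blank lines, every line must contain ':' or start with ' ', the first one must contain ':',
-- and a ':'-free (continuation) line may not directly follow a line whose attribute is empty
-- (i.e. one starting with ':').
def Pre_indexread (index : List String) : Prop :=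
  (∀ l ∈ pvNb index, PySem.Str.isIn ":" l = true ∨ l.toList.head? = some ' ') ∧
  (∀ l ∈ (pvNb index).take 1, PySem.Str.isIn ":" l = true) ∧
  List.IsChain (fun prev l => PySem.Str.isIn ":" l = true ∨ prev.toList.head? ≠ some ':') (pvNb index)

instance (index : List String) : Decidable (Pre_indexread index) := by unfold Pre_indexread; infer_instance

def pvWitness_indexread : List String :=
  ["Package: foo", "Desc: line one", " line two", "", "", "Package: bar", "V: 1"]

def Spec_indexread (index : List String) (out : List (List (String × String))) : Prop := out = indexread_alt index
instance (index : List String) (out : List (List (String × String))) : Decidable (Spec_indexread index out) := by unfold Spec_indexread; infer_instance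

-- ===== CLAIM (what is proved, stated in full; the proofs are below) =====
def Claim_equal_indexread : Prop := ∀ (index : List String), Dom_indexread index → Pre_indexread index → Spec_indexread index (indexread index)

-- ===== LEMMAS AND PROOFS =====

-- the validity automaton A actually runs; the Bool is the Python truthiness of `last`
def pvValidFrom : Bool → List String → Bool
  | _, [] => true
  | lt, raw :: rest =>
    let line := PySem.Str.rstrip raw
    if line = "" then pvValidFrom lt rest
    else if line.toList.head? = some ' ' ∧ lt = true then pvValidFrom lt rest
    else if PySem.Str.isIn ":" line then
      pvValidFrom (match PySem.Str.splitMax? line ":" 1 with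
                   | some (attr :: _ :: _) => attr != ""
                   | _ => lt) rest
    else false

-- facts about str.split(':', 1) needed to bridge Pre_ and the automaton
lemma go_len_mzero (fuel : Nat) (l cur : List Char) (acc : List (List Char)) :
    (PySem.Chars.splitOnMax.go [':'] fuel 0 l cur acc).length = acc.length + 1 := by
  cases fuel <;> cases l <;>
    simp [PySem.Chars.splitOnMax.go]

lemma go_len_colon : ∀ (fuel : Nat) (l cur : List Char) (acc : List (List Char)),
    l.length < fuel → ':' ∈ l →
    (PySem.Chars.splitOnMax.go [':'] fuel 1 l cur acc).length = acc.length + 2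
  | 0, l, cur, acc, hf, _ => by omega
  | fuel + 1, [], cur, acc, _, hm => by simp at hm
  | fuel + 1, c :: rest, cur, acc, hf, hm => by
    rw [PySem.Chars.splitOnMax.go]
    by_cases hpre : [':'].isPrefixOf (c :: rest) = true
    · simp only [hpre, if_true, if_neg (by omega : ¬ (1 : Nat) = 0)]
      rw [go_len_mzero]
      simp
    · simp only [hpre, if_false, if_neg (by omega : ¬ (1 : Nat) = 0), Bool.false_eq_true]
      have hc : c ≠ ':' := by
        intro h; subst h; simp [List.isPrefixOf] at hpre
      have hm' : ':' ∈ rest := by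
        rcases List.mem_cons.mp hm with h | h
        · exact absurd h.symm hc
        · exact h
      rw [go_len_colon fuel rest (c :: cur) acc (by simpa using hf) hm']

lemma go_head_acc : ∀ (fuel m : Nat) (l cur : List Char) (as : List (List Char)) (a0 : List Char),
    (PySem.Chars.splitOnMax.go [':'] fuel m l cur (as ++ [a0])).head? = some a0
  | 0, m, l, cur, as, a0 => by
    simp [PySem.Chars.splitOnMax.go]
  | fuel + 1, m, [], cur, as, a0 => by
    simp [PySem.Chars.splitOnMax.go]
  | fuel + 1, m, c :: rest, cur, as, a0 => by
    rw [PySem.Chars.splitOnMax.go]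
    by_cases hm : m = 0
    · simp [hm]
    · simp only [if_neg hm]
      by_cases hpre : [':'].isPrefixOf (c :: rest) = true
      · simp only [hpre, if_true]
        have : (cur.reverse :: (as ++ [a0])) = ((cur.reverse :: as) ++ [a0]) := by simp
        rw [this, go_head_acc]
      · simp only [hpre, Bool.false_eq_true, if_false]
        exact go_head_acc fuel m rest (c :: cur) as a0

lemma go_head_nil : ∀ (fuel m : Nat) (l cur : List Char),
    ∃ t, (PySem.Chars.splitOnMax.go [':'] fuel m l cur []).head? = some (cur.reverse ++ t)
  | 0, m, l, cur => ⟨l, by simp [PySem.Chars.splitOnMax.go]⟩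
  | fuel + 1, m, [], cur => ⟨[], by simp [PySem.Chars.splitOnMax.go]⟩
  | fuel + 1, m, c :: rest, cur => by
    rw [PySem.Chars.splitOnMax.go]
    by_cases hm : m = 0
    · exact ⟨c :: rest, by simp [hm]⟩
    · simp only [if_neg hm]
      by_cases hpre : [':'].isPrefixOf (c :: rest) = true
      · refine ⟨[], ?_⟩
        simp only [hpre, if_true]
        have : ([] : List (List Char)) ++ [cur.reverse] = [cur.reverse] := rfl
        rw [← this, go_head_acc]
        simp
      · simp only [hpre, Bool.false_eq_true, if_false]
        obtain ⟨t, ht⟩ := go_head_nil fuel m rest (c :: cur)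
        exact ⟨c :: t, by rw [ht]; simp⟩

lemma splitMax_shape (line : String) (hc : PySem.Str.isIn ":" line = true) :
    ∃ attr value, PySem.Str.splitMax? line ":" 1 = some [attr, value] := by
  have hmem : ':' ∈ line.toList := by
    have := (PySem.Str.isIn_iff_infix (sub := ":") (s := line)).mp hc
    have h2 : (":" : String).toList <:+: line.toList := by simpa using this
    exact h2.mem (by simp)
  have hlen : (PySem.Chars.splitOnMax line.toList [':'] 1).length = 2 := by
    rw [PySem.Chars.splitOnMax]
    simp only [if_neg (by norm_num : ¬ (1 : Int) < 0), Int.toNat_one]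
    rw [go_len_colon (line.toList.length + 1) line.toList [] [] (by omega) hmem]
    rfl
  rcases hp : PySem.Chars.splitOnMax line.toList [':'] 1 with _ | ⟨p0, _ | ⟨p1, _ | _⟩⟩ <;>
    rw [hp] at hlen <;> simp at hlen
  refine ⟨String.ofList p0, String.ofList p1, ?_⟩
  simp [PySem.Str.splitMax?, PySem.Chars.splitMax?, hp]

lemma attr_ne_empty (line : String) (hne : line ≠ "") (hh : line.toList.head? ≠ some ':')
    (attr value : String) (tail : List String)
    (hsp : PySem.Str.splitMax? line ":" 1 = some (attr :: value :: tail)) : attr ≠ "" := by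
  rcases hl : line.toList with _ | ⟨c, cs⟩
  · exfalso
    apply hne
    have : String.ofList line.toList = String.ofList [] := by rw [hl]
    simpa using this
  have hc : c ≠ ':' := by rw [hl] at hh; simpa using hh
  obtain ⟨t, ht⟩ := go_head_nil (c :: cs).length 1 cs [c]
  have hgo : (PySem.Chars.splitOnMax line.toList [':'] 1).head? = some (c :: t) := by
    rw [PySem.Chars.splitOnMax]
    rw [if_neg (by norm_num : ¬ (1 : Int) < 0)]
    rw [hl, PySem.Chars.splitOnMax.go]
    have hpre : ([':'].isPrefixOf (c :: cs)) = false := by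
      simp [List.isPrefixOf, Ne.symm hc]
    simp only [hpre, Bool.false_eq_true, if_false]
    simpa using ht
  rw [PySem.Str.splitMax?, PySem.Chars.splitMax?] at hsp
  have hts : (":" : String).toList = [':'] := by decide
  simp only [hts, List.isEmpty_cons, Bool.false_eq_true, if_false, Option.map_some,
    Option.some.injEq] at hsp
  rcases hp : PySem.Chars.splitOnMax line.toList [':'] 1 with _ | ⟨p0, ps⟩
  · rw [hp] at hsp; simp at hsp
  · rw [hp] at hsp hgo
    simp only [List.head?_cons, Option.some.injEq] at hgo
    rw [List.map_cons] at hsp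
    injection hsp with hA _
    subst hgo
    intro hcon
    rw [hcon] at hA
    have := congrArg String.toList hA
    simp at this

-- Pre_ implies the automaton accepts
lemma validFrom_of_nb : ∀ (L : List String) (lt : Bool),
    (∀ l ∈ pvNb L, PySem.Str.isIn ":" l = true ∨ l.toList.head? = some ' ') →
    (∀ l ∈ (pvNb L).take 1, PySem.Str.isIn ":" l = true ∨ lt = true) →
    List.IsChain (fun prev l => PySem.Str.isIn ":" l = true ∨ prev.toList.head? ≠ some ':') (pvNb L) →
    pvValidFrom lt L = true
  | [], lt, _, _, _ => rfl
  | raw :: rest, lt, h1, h2, h3 => by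
    rw [pvValidFrom]
    by_cases hline : PySem.Str.rstrip raw = ""
    · simp only [hline, if_true]
      have hnb : pvNb (raw :: rest) = pvNb rest := by
        simp [pvNb, hline]
      rw [hnb] at h1 h2 h3
      exact validFrom_of_nb rest lt h1 h2 h3
    · simp only [hline, if_false]
      have hnb : pvNb (raw :: rest) = PySem.Str.rstrip raw :: pvNb rest := by
        simp [pvNb, hline]
      rw [hnb] at h1 h2 h3
      by_cases hcont : (PySem.Str.rstrip raw).toList.head? = some ' ' ∧ lt = true
      · rw [if_pos hcont]
        exact validFrom_of_nb rest lt (fun l hl => h1 l (List.mem_cons_of_mem _ hl))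
          (fun l _ => Or.inr hcont.2) h3.tail
      · rw [if_neg hcont]
        by_cases hc : PySem.Str.isIn ":" (PySem.Str.rstrip raw) = true
        · rw [if_pos hc]
          obtain ⟨attr, value, hsp⟩ := splitMax_shape _ hc
          rw [hsp]
          refine validFrom_of_nb rest _ (fun l hl => h1 l (List.mem_cons_of_mem _ hl)) ?_ h3.tail
          intro l hl
          rcases hnbr : pvNb rest with _ | ⟨b, t⟩
          · rw [hnbr] at hl; simp at hl
          · rw [hnbr] at hl h3
            have hRel := (List.isChain_cons_cons.mp h3).1
            have hlb : l = b := by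
              simp [List.take] at hl
              exact hl
            subst hlb
            rcases hRel with hcl | hprev
            · exact Or.inl hcl
            · refine Or.inr ?_
              have hattr := attr_ne_empty _ hline hprev attr value [] hsp
              simpa using hattr
        · -- the line is neither blank nor a valid continuation nor a key line: Pre_ refutes this
          exfalso
          have hsp' : (PySem.Str.rstrip raw).toList.head? = some ' ' := by
            rcases h1 (PySem.Str.rstrip raw) (by simp) with h | h
            · exact absurd h hc
            · exact h
          rcases h2 (PySem.Str.rstrip raw) (by simp) with h | h
          · exact hc h
          · exact hcont ⟨hsp', h⟩


-- the pass-2 state reached after the tokens emitted so far (revToks is reversed)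
def runToks (revToks : List Tok) : List (List (String × String)) × PySem.Dict String String :=
  revToks.reverse.foldl pass2Step ([], PySem.Dict.empty)

-- `last` of A as read off B's reversed token list
def pvLastOf : List Tok → Option String
  | Tok.kv a _ :: _ => some a
  | _ => none

-- invariant: the reversed token list is empty or headed by a kv entry
def HeadKV (revToks : List Tok) : Prop :=
  revToks = [] ∨ ∃ a v rt, revToks = Tok.kv a v :: rt

lemma runToks_cons (t : Tok) (rt : List Tok) :
    runToks (t :: rt) = pass2Step (runToks rt) t := by
  simp [runToks, List.foldl_append]

lemma modify_insert_self (d : PySem.Dict String String) (k : String) (v d0 : String) (f : String → String) :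
    (d.insert k v).modify k d0 f = d.insert k (f v) := by
  simp [PySem.Dict.modify, PySem.Dict.getD_insert_self, PySem.Dict.insert_insert_self]

-- main loop correspondence: A's loop from the state represented by revToks equals
-- pass 2 run on pass 1's output continued from revToks
set_option maxHeartbeats 2000000 in
lemma go_eq_passes : ∀ (L : List String) (revToks : List Tok) (e : Nat),
    HeadKV revToks →
    pvValidFrom (pvHeadAttrTruthy revToks) L = true →
    indexreadGo L (runToks revToks).1 (runToks revToks).2 (pvLastOf revToks) e
      = (let st := (pass1 L revToks e).foldl pass2Step ([], PySem.Dict.empty); st.1 ++ [st.2.items])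
  | [], revToks, e, _hk, _hv => by
      simp [indexreadGo, pass1, runToks]
  | raw :: rest, revToks, e, hk, hv => by
      rw [indexreadGo, pass1]
      rw [pvValidFrom] at hv
      by_cases hline : PySem.Str.rstrip raw = ""
      · -- blank line
        simp only [hline, if_true] at hv ⊢
        exact go_eq_passes rest revToks (e + 1) hk hv
      · simp only [hline, if_false] at hv ⊢
        by_cases hcontA : (PySem.Str.rstrip raw).toList.head? = some ' ' ∧ pvHeadAttrTruthy revToks = true
        · -- continuation line
          obtain ⟨a, v, rt, hrt⟩ : ∃ a v rt, revToks = Tok.kv a v :: rt := by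
            rcases hk with h0 | h
            · rw [h0] at hcontA; simp [pvHeadAttrTruthy] at hcontA
            · exact h
          subst hrt
          have hcontA' : (PySem.Str.rstrip raw).toList.head? = some ' ' ∧ pvLastTruthy (pvLastOf (Tok.kv a v :: rt)) = true := hcontA
          rw [if_pos hcontA', if_pos hcontA]
          rw [if_pos hcontA] at hv
          have hih := go_eq_passes rest
            (Tok.kv a (String.ofList (v.toList ++ List.replicate e '\n' ++ '\n' :: (PySem.Str.rstrip raw).toList.drop 1)) :: rt) 0
            (Or.inr ⟨_, _, _, rfl⟩) (by simpa [pvHeadAttrTruthy] using hv)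
          simp only [contUpdate]
          simp only [runToks_cons, pass2Step, pvLastOf, Option.getD_some] at hih ⊢
          by_cases he : e ≠ 0
          · rw [if_pos he, modify_insert_self, modify_insert_self]
            simpa [List.append_assoc] using hih
          · rw [if_neg he, modify_insert_self]
            simp only [ne_eq, not_not] at he
            subst he
            simpa [List.append_assoc] using hih
        · -- not a continuation: same falsity on B's side
          have hcontA' : ¬((PySem.Str.rstrip raw).toList.head? = some ' ' ∧ pvLastTruthy (pvLastOf revToks) = true) := by
            intro h
            exact hcontA ⟨h.1, by
              rcases hk with h0 | ⟨a, v, rt, hrt⟩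
              · rw [h0] at h ⊢; exact h.2
              · rw [hrt] at h ⊢; exact h.2⟩
          rw [if_neg hcontA', if_neg hcontA]
          rw [if_neg hcontA] at hv
          by_cases hcolon : PySem.Str.isIn ":" (PySem.Str.rstrip raw) = true
          · rw [if_pos hcolon] at hv ⊢
            rw [if_pos hcolon]
            rcases hsp : PySem.Str.splitMax? (PySem.Str.rstrip raw) ":" 1 with _ | (_ | ⟨attr, _ | ⟨value, l''⟩⟩)
            · rw [hsp] at hv; exact go_eq_passes rest revToks e hk hv
            · rw [hsp] at hv; exact go_eq_passes rest revToks e hk hv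
            · rw [hsp] at hv; exact go_eq_passes rest revToks e hk hv
            · -- the real key-line case
              rw [hsp] at hv
              clear hsp
              by_cases he : e ≠ 0
              · rw [if_pos he, if_pos he]
                have hih := go_eq_passes rest (Tok.kv attr (PySem.Str.strip value) :: Tok.sep :: revToks) 0
                  (Or.inr ⟨_, _, _, rfl⟩) hv
                simp only [runToks_cons, pass2Step, pvLastOf] at hih
                exact hih
              · rw [if_neg he, if_neg he]
                have hih := go_eq_passes rest (Tok.kv attr (PySem.Str.strip value) :: revToks) 0
                  (Or.inr ⟨_, _, _, rfl⟩) hv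
                simp only [runToks_cons, pass2Step, pvLastOf] at hih
                exact hih
          · -- invalid line: Pre_ rules this out
            rw [if_neg hcolon] at hv
            exact absurd hv (by simp)

-- ===== VERDICT (by name: the statement is the Claim_ definition above) =====
theorem indexread_spec : Claim_equal_indexread := by
  intro index _hDom hPre
  obtain ⟨h1, h2, h3⟩ := hPre
  have hv : pvValidFrom false index = true :=
    validFrom_of_nb index false h1 (fun l hl => Or.inl (h2 l hl)) h3
  unfold Spec_indexread indexread indexread_alt
  have h := go_eq_passes index [] 0 (Or.inl rfl) hv
  simpa [runToks, pvLastOf] using h
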